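-- pv_equiv track=rewrite | github.com/Gseungmin/Algorithm | 백준/Silver/2805. 나무 자르기/나무 자르기.py | tree_cutting
-- ===== SOURCE A (Python) =====
-- def tree_cutting(Needs,Height):
--     Min = 0
--     Max = max(Height)
--     while Min <= Max:
--         Mean = (Min + Max) // 2
--         Sum = 0
--         for i in range(len(Height)):
--             if Height[i] - Mean > 0:
--                 Sum += Height[i] - Mean
--         if Sum == Needs:
--             return Mean
--         if Sum > Needs:
--             Min = Mean + 1
--         elif Sum < Needs:
--             Max = Mean - 1
--     return Max
-- ===== SOURCE B (Python) =====
-- def tree_cutting(Needs, Height):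
--     # Sort once and precompute prefix sums; each binary-search step then costs
--     # O(log n) (inner bisect) instead of a full O(n) rescan of Height.
--     Max = max(Height)
--     H = sorted(Height)
--     n = len(H)
--     prefix = [0]
--     for h in H:
--         prefix.append(prefix[-1] + h)
--     total = prefix[n]
--     Min = 0
--     while Min <= Max:
--         Mean = (Min + Max) // 2
--         lo, hi = 0, n
--         while lo < hi:
--             mid = (lo + hi) // 2
--             if H[mid] <= Mean:
--                 lo = mid + 1
--             else:
--                 hi = mid
--         idx = lo
--         Sum = (total - prefix[idx]) - Mean * (n - idx)
--         if Sum == Needs: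
--             return Mean
--         if Sum > Needs:
--             Min = Mean + 1
--         elif Sum < Needs:
--             Max = Mean - 1
--     return Max
-- ===== Notes on version B (the rewrite author's own statement) =====
-- stated objective: faster
-- what changed: B sorts Height once and builds a prefix-sum table, then each binary-search iteration obtains the harvested total by a hand-written bisect on the sorted array plus one prefix-sum lookup instead of rescanning every tree.
import Mathlib
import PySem

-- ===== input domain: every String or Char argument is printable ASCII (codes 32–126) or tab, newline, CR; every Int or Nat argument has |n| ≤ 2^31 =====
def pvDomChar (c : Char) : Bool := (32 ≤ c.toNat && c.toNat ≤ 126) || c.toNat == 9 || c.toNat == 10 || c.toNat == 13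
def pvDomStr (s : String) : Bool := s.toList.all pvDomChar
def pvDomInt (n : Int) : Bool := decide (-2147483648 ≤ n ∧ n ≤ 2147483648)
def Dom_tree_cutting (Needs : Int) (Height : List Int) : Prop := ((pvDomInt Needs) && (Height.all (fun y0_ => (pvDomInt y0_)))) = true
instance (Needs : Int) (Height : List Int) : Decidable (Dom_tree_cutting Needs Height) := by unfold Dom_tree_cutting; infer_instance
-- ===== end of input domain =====

-- B replaces A's per-iteration linear rescan of Height by a one-time sort +
-- prefix-sum table and an O(log n) bisect lookup inside the same binary search.

-- ===== PORT A =====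

-- inner 'for i in range(len(Height)): if Height[i] - Mean > 0: Sum += Height[i] - Mean'
def aSum (Height : List Int) (Mean : Int) : Int :=
  (PySem.List.pyRange 0 (Height.length : Int) 1).foldl
    (fun S i =>
      if PySem.List.pyGetD Height i 0 - Mean > 0 then S + (PySem.List.pyGetD Height i 0 - Mean)
      else S) 0

-- outer 'while Min <= Max' loop of A
def aLoop (Needs : Int) (Height : List Int) (Min Max : Int) : Int :=
  if Min ≤ Max then
    let Mean := PySem.Int.floordiv (Min + Max) 2
    let Sum := aSum Height Mean
    if Sum = Needs then Mean
    else if Sum > Needs then aLoop Needs Height (Mean + 1) Max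
    else aLoop Needs Height Min (Mean - 1)
  else Max
termination_by (Max + 1 - Min).toNat
decreasing_by
  · have h := PySem.Int.floordiv_two_mid_bounds (by assumption : Min ≤ Max); omega
  · have h := PySem.Int.floordiv_two_mid_bounds (by assumption : Min ≤ Max); omega

def tree_cutting (Needs : Int) (Height : List Int) : Int :=
  -- max(Height); under Pre_ (Height ≠ []) the default is never used
  aLoop Needs Height 0 ((PySem.List.max? Height (fun y => y)).getD 0)

-- ===== PORT B =====

-- hand-written bisect_right: 'while lo < hi: mid = (lo+hi)//2; ...'
def bBisect (H : List Int) (x : Int) (lo hi : Nat) : Nat :=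
  if lo < hi then
    let mid := (lo + hi) / 2
    if PySem.List.pyGetD H (mid : Int) 0 ≤ x then bBisect H x (mid + 1) hi
    else bBisect H x lo mid
  else lo
termination_by hi - lo
decreasing_by all_goals omega

-- 'Sum = (total - prefix[idx]) - Mean * (n - idx)' with idx from the bisect
def bSum (H pfx : List Int) (total : Int) (n : Nat) (Mean : Int) : Int :=
  let idx := bBisect H Mean 0 n
  (total - PySem.List.pyGetD pfx (idx : Int) 0) - Mean * ((n : Int) - (idx : Int))

-- outer 'while Min <= Max' loop of B (same search, table-based inner sum)
def bLoop (Needs : Int) (H pfx : List Int) (total : Int) (n : Nat) (Min Max : Int) : Int :=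
  if Min ≤ Max then
    let Mean := PySem.Int.floordiv (Min + Max) 2
    let Sum := bSum H pfx total n Mean
    if Sum = Needs then Mean
    else if Sum > Needs then bLoop Needs H pfx total n (Mean + 1) Max
    else bLoop Needs H pfx total n Min (Mean - 1)
  else Max
termination_by (Max + 1 - Min).toNat
decreasing_by
  · have h := PySem.Int.floordiv_two_mid_bounds (by assumption : Min ≤ Max); omega
  · have h := PySem.Int.floordiv_two_mid_bounds (by assumption : Min ≤ Max); omega

def tree_cutting_alt (Needs : Int) (Height : List Int) : Int :=
  let Max := (PySem.List.max? Height (fun y => y)).getD 0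
  let H := PySem.List.sorted Height (fun y => y) false
  let n := H.length
  -- 'prefix = [0]; for h in H: prefix.append(prefix[-1] + h)'
  let pfx := H.foldl (fun p h => p ++ [PySem.List.pyGetD p (-1) 0 + h]) [0]
  let total := PySem.List.pyGetD pfx (n : Int) 0
  bLoop Needs H pfx total n 0 Max

-- ===== PRECONDITION & SPEC =====
-- Pre_ excludes only the empty list, on which A's max(Height) raises ValueError (B raises there too).
def Pre_tree_cutting (Needs : Int) (Height : List Int) : Prop := Height ≠ []
instance (Needs : Int) (Height : List Int) : Decidable (Pre_tree_cutting Needs Height) := by unfold Pre_tree_cutting; infer_instance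
def pvWitness_tree_cutting : Int × List Int := (7, [20, 15, 10, 17])

def Spec_tree_cutting (Needs : Int) (Height : List Int) (out : Int) : Prop := out = tree_cutting_alt Needs Height
instance (Needs : Int) (Height : List Int) (out : Int) : Decidable (Spec_tree_cutting Needs Height out) := by unfold Spec_tree_cutting; infer_instance

-- ===== CLAIM (what is proved, stated in full; the proofs are below) =====
def Claim_equal_tree_cutting : Prop := ∀ (Needs : Int) (Height : List Int), Dom_tree_cutting Needs Height → Pre_tree_cutting Needs Height → Spec_tree_cutting Needs Height (tree_cutting Needs Height)

-- ===== LEMMAS AND PROOFS =====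

-- partial sums starting from s (the mathematical contents of B's prefix list)
def psums (s : Int) : List Int → List Int
  | [] => []
  | h :: t => (s + h) :: psums (s + h) t

theorem psums_foldl (L p : List Int) (hp : p ≠ []) :
    L.foldl (fun p h => p ++ [PySem.List.pyGetD p (-1) 0 + h]) p
      = p ++ psums (p.getLast hp) L := by
  induction L generalizing p with
  | nil => simp [psums]
  | cons h t ih =>
    simp only [List.foldl_cons]
    rw [PySem.List.pyGetD_neg_one p 0 hp]
    rw [ih (p ++ [p.getLast hp + h]) (by simp)]
    simp [psums]

theorem psums_getD (L : List Int) (s : Int) (k : Nat) (hk : k ≤ L.length) :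
    (s :: psums s L).getD k 0 = s + (L.take k).sum := by
  induction L generalizing s k with
  | nil =>
    have : k = 0 := by simpa using hk
    simp [this]
  | cons h t ih =>
    cases k with
    | zero => simp
    | succ k =>
      simp only [psums, List.getD]
      have := ih (s + h) k (by simpa using hk)
      simp only [List.getD] at this
      simp [this, List.take_succ_cons, add_assoc]

-- bisect invariant: everything strictly left of the result is ≤ x, everything
-- from the result on is > x (on a sorted list)
theorem bBisect_go (H : List Int) (x : Int)
    (hs : H.Pairwise (· ≤ ·)) :
    ∀ d lo hi, hi - lo ≤ d → hi ≤ H.length → lo ≤ hi →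
    (∀ j (_ : j < H.length), j < lo → H[j] ≤ x) →
    (∀ j (_ : j < H.length), hi ≤ j → x < H[j]) →
    bBisect H x lo hi ≤ H.length ∧
      (∀ j (_ : j < H.length), j < bBisect H x lo hi → H[j] ≤ x) ∧
      (∀ j (_ : j < H.length), bBisect H x lo hi ≤ j → x < H[j]) := by
  intro d
  induction d with
  | zero =>
    intro lo hi hd hhi hlh hlow hup
    have : ¬ lo < hi := by omega
    rw [bBisect, if_neg this]
    exact ⟨by omega, fun j hj hjl => hlow j hj hjl, fun j hj hjl => hup j hj (by omega)⟩
  | succ d ih =>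
    intro lo hi hd hhi hlh hlow hup
    rw [bBisect]
    by_cases hlt : lo < hi
    · rw [if_pos hlt]
      have hmidlt : (lo + hi) / 2 < H.length := by omega
      have hgd : PySem.List.pyGetD H (((lo + hi) / 2 : Nat) : Int) 0 = H[(lo + hi) / 2] := by
        rw [PySem.List.pyGetD_natCast]
        exact List.getD_eq_getElem H 0 hmidlt
      by_cases hle : PySem.List.pyGetD H (((lo + hi) / 2 : Nat) : Int) 0 ≤ x
      · rw [if_pos hle]
        have hmid : H[(lo + hi) / 2] ≤ x := hgd ▸ hle
        refine ih ((lo + hi) / 2 + 1) hi (by omega) hhi (by omega) ?_ hup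
        intro j hj hjm
        rcases Nat.lt_or_ge j ((lo + hi) / 2) with h | h
        · exact le_trans (List.pairwise_iff_getElem.mp hs j _ hj hmidlt h) hmid
        · have : j = (lo + hi) / 2 := by omega
          simpa [this] using hmid
      · rw [if_neg hle]
        have hmid : x < H[(lo + hi) / 2] := by rw [hgd] at hle; omega
        refine ih lo ((lo + hi) / 2) (by omega) (by omega) (by omega) hlow ?_
        intro j hj hjm
        rcases Nat.eq_or_lt_of_le hjm with h' | h'
        · simpa [← h']
        · exact lt_of_lt_of_le hmid (List.pairwise_iff_getElem.mp hs _ j hmidlt hj h')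
    · rw [if_neg hlt]
      exact ⟨by omega, fun j hj hjl => hlow j hj hjl, fun j hj hjl => hup j hj (by omega)⟩

theorem bBisect_spec (H : List Int) (x : Int)
    (hs : H.Pairwise (· ≤ ·)) (n : Nat) (hn : n = H.length) :
    bBisect H x 0 n ≤ H.length ∧
      (∀ j (_ : j < H.length), j < bBisect H x 0 n → H[j] ≤ x) ∧
      (∀ j (_ : j < H.length), bBisect H x 0 n ≤ j → x < H[j]) :=
  bBisect_go H x hs n 0 n (by omega) (by omega) (by omega)
    (by omega) (fun j hj hnj => by omega)

-- A's inner loop as a sum over the list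
theorem foldl_condsum (Mean : Int) : ∀ (L : List Int) (s : Int),
    L.foldl (fun S h => if h - Mean > 0 then S + (h - Mean) else S) s
      = s + (L.map (fun h => if h - Mean > 0 then h - Mean else 0)).sum := by
  intro L
  induction L with
  | nil => intro s; simp
  | cons a t ih =>
    intro s
    simp only [List.foldl_cons, List.map_cons, List.sum_cons, ih]
    split_ifs <;> ring

theorem aSum_eq_sum_map (Height : List Int) (Mean : Int) :
    aSum Height Mean
      = (Height.map (fun h => if h - Mean > 0 then h - Mean else 0)).sum := by
  unfold aSum
  rw [PySem.List.foldl_pyRange_zero_pyGetD' Height 0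
    (fun S h => if h - Mean > 0 then S + (h - Mean) else S) 0]
  rw [foldl_condsum]
  ring

theorem sum_map_of_le (Mean : Int) (L : List Int) (h : ∀ y ∈ L, y ≤ Mean) :
    (L.map (fun h => if h - Mean > 0 then h - Mean else 0)).sum = 0 := by
  induction L with
  | nil => simp
  | cons a t ih =>
    have ha := h a (by simp)
    have ht := ih (fun y hy => h y (List.mem_cons_of_mem _ hy))
    simp only [List.map_cons, List.sum_cons, ht]
    rw [if_neg (by omega : ¬ a - Mean > 0)]
    ring

theorem sum_map_of_gt (Mean : Int) (L : List Int) (h : ∀ y ∈ L, Mean < y) :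
    (L.map (fun h => if h - Mean > 0 then h - Mean else 0)).sum
      = L.sum - Mean * L.length := by
  induction L with
  | nil => simp
  | cons a t ih =>
    have ha := h a (by simp)
    have ht := ih (fun y hy => h y (List.mem_cons_of_mem _ hy))
    simp only [List.map_cons, List.sum_cons, ht, List.length_cons]
    rw [if_pos (by omega : a - Mean > 0)]
    push_cast
    ring

-- the key step: B's table lookup computes exactly A's rescanned sum
theorem bSum_eq_aSum (Height : List Int) (Mean : Int) :
    bSum (PySem.List.sorted Height (fun y => y) false)
      ((PySem.List.sorted Height (fun y => y) false).foldl
        (fun p h => p ++ [PySem.List.pyGetD p (-1) 0 + h]) [0])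
      (PySem.List.pyGetD
        ((PySem.List.sorted Height (fun y => y) false).foldl
          (fun p h => p ++ [PySem.List.pyGetD p (-1) 0 + h]) [0])
        ((PySem.List.sorted Height (fun y => y) false).length : Int) 0)
      (PySem.List.sorted Height (fun y => y) false).length Mean
      = aSum Height Mean := by
  set H := PySem.List.sorted Height (fun y => y) false with hH
  have hperm : H.Perm Height := PySem.List.sorted_perm Height (fun y => y) false
  have hpair : H.Pairwise (· ≤ ·) := PySem.List.sorted_pairwise Height (fun y => y)
  have hpfx : H.foldl (fun p h => p ++ [PySem.List.pyGetD p (-1) 0 + h]) [0]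
      = 0 :: psums 0 H := by
    rw [psums_foldl H [0] (by simp)]
    simp [List.getLast]
  rw [hpfx]
  set n := H.length with hn
  obtain ⟨hle, hbelow, habove⟩ := bBisect_spec H Mean hpair n hn
  set idx := bBisect H Mean 0 n with hidx
  simp only [bSum, ← hidx]
  have hg1 : PySem.List.pyGetD (0 :: psums 0 H) ((idx : Nat) : Int) 0
      = 0 + (H.take idx).sum := by
    rw [PySem.List.pyGetD_natCast]
    exact psums_getD H 0 idx hle
  have hg2 : PySem.List.pyGetD (0 :: psums 0 H) ((n : Nat) : Int) 0
      = 0 + (H.take n).sum := by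
    rw [PySem.List.pyGetD_natCast]
    exact psums_getD H 0 n (by omega)
  rw [hg1, hg2]
  have htd : H = H.take idx ++ H.drop idx := (List.take_append_drop idx H).symm
  have htake : ∀ y ∈ H.take idx, y ≤ Mean := by
    intro y hy
    obtain ⟨j, hj, rfl⟩ := List.getElem_of_mem hy
    have h2 : j < idx ∧ j < H.length := by
      simp [List.length_take] at hj; omega
    rw [List.getElem_take]
    exact hbelow j h2.2 h2.1
  have hdrop : ∀ y ∈ H.drop idx, Mean < y := by
    intro y hy
    obtain ⟨j, hj, rfl⟩ := List.getElem_of_mem hy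
    have h2 : idx + j < H.length := by
      simp [List.length_drop] at hj; omega
    rw [List.getElem_drop]
    exact habove (idx + j) h2 (by omega)
  have hlen : ((H.drop idx).length : Int) = (n : Int) - (idx : Int) := by
    have h1 : (H.drop idx).length = H.length - idx := List.length_drop
    have h2 : idx ≤ H.length := hle
    omega
  have hsplit : (H.take n).sum = (H.take idx).sum + (H.drop idx).sum := by
    conv_lhs => rw [List.take_of_length_le (by omega)]
    conv_lhs => rw [htd]
    simp
  rw [aSum_eq_sum_map]
  have := hperm.map (fun h => if h - Mean > 0 then h - Mean else 0)
  rw [← this.sum_eq]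
  conv_rhs => rw [htd]
  rw [List.map_append, List.sum_append, sum_map_of_le Mean _ htake,
    sum_map_of_gt Mean _ hdrop, hsplit, ← hlen]
  ring

theorem loops_eq_go (Needs : Int) (Height H pfx : List Int) (total : Int) (n : Nat)
    (hs : ∀ Mean, bSum H pfx total n Mean = aSum Height Mean) :
    ∀ d Min Max, (Max + 1 - Min).toNat ≤ d →
      aLoop Needs Height Min Max = bLoop Needs H pfx total n Min Max := by
  intro d
  induction d with
  | zero =>
    intro Min Max hd
    have hn : ¬ Min ≤ Max := by omega
    rw [aLoop, bLoop, if_neg hn, if_neg hn]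
  | succ d ih =>
    intro Min Max hd
    rw [aLoop, bLoop]
    by_cases hle : Min ≤ Max
    · rw [if_pos hle, if_pos hle]
      simp only [hs]
      have hb := PySem.Int.floordiv_two_mid_bounds hle
      split_ifs with h1 h2
      · rfl
      · exact ih _ _ (by omega)
      · exact ih _ _ (by omega)
    · rw [if_neg hle, if_neg hle]

theorem loops_eq (Needs : Int) (Height H pfx : List Int) (total : Int) (n : Nat)
    (hs : ∀ Mean, bSum H pfx total n Mean = aSum Height Mean) :
    ∀ Min Max, aLoop Needs Height Min Max = bLoop Needs H pfx total n Min Max :=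
  fun Min Max => loops_eq_go Needs Height H pfx total n hs (Max + 1 - Min).toNat Min Max le_rfl

-- ===== VERDICT (by name: the statement is the Claim_ definition above) =====
theorem tree_cutting_spec : Claim_equal_tree_cutting := by
  intro Needs Height _ _
  unfold Spec_tree_cutting tree_cutting tree_cutting_alt
  exact loops_eq Needs Height _ _ _ _ (bSum_eq_aSum Height) 0 _
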